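-- pv_equiv track=rewrite | github.com/TanyaAng/Python_Advanced | 07_Multidimensional_lists_Exercises/10_radioactive_mutant_vampire_bunnies.py | spread_bunnies
-- ===== SOURCE A (Python) =====
-- def spread_bunnies(matrix):
--     bunnies_coords = []
--     is_player_dies = False
--     for i in range(len(matrix)):
--         for j in range(len(matrix[0])):
--             if matrix[i][j] == 'B':
--                 bunnies_coords.append((i, j))
--     for i, j in bunnies_coords:
--         for dir in directions:
--             current_i, current_j = directions[dir](i, j)
--             if current_i in range(len(matrix)) and current_j in range(len(matrix[0])):
--                 if matrix[current_i][current_j] == 'P':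
--                     matrix[current_i][current_j] = 'B'
--                     is_player_dies = True
--                 else:
--                     matrix[current_i][current_j] = 'B'
--     return is_player_dies, matrix
--
-- directions = {'U': lambda r, c: (r - 1, c), 'D': lambda r, c: (r + 1, c), 'L': lambda r, c: (r, c - 1),
--               'R': lambda r, c: (r, c + 1)}
-- ===== SOURCE B (Python) =====
-- def spread_bunnies(matrix):
--     # Gather pass over a snapshot: each cell becomes 'B' iff it is or touches an
--     # original bunny; mutates matrix in place and returns it, like the original.
--     if not matrix:
--         return False, matrix
--     rows, cols = len(matrix), len(matrix[0])
--     snap = [row[:] for row in matrix]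
--     def bunny(i, j):
--         return 0 <= i < rows and 0 <= j < cols and snap[i][j] == 'B'
--     def near(i, j):
--         return bunny(i - 1, j) or bunny(i + 1, j) or bunny(i, j - 1) or bunny(i, j + 1)
--     died = any(snap[i][j] == 'P' and near(i, j)
--                for i in range(rows) for j in range(cols))
--     for i in range(rows):
--         matrix[i][:cols] = ['B' if bunny(i, j) or near(i, j) else snap[i][j]
--                             for j in range(cols)]
--     return died, matrix
-- ===== Notes on version B (the rewrite author's own statement) =====
-- stated objective: alternative
-- what changed: A collects bunny coordinates and scatters writes from each bunny into its four neighbours over a mutating grid; B takes a snapshot and does a single gather pass computing each cell's new value ('B' iff it is or orthogonally touches an original bunny) and the death flag directly from the snapshot.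
-- outside the precondition, e.g. on spread_bunnies([['B', 'x'], ['P']]): A raises IndexError, B raises IndexError
import Mathlib
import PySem

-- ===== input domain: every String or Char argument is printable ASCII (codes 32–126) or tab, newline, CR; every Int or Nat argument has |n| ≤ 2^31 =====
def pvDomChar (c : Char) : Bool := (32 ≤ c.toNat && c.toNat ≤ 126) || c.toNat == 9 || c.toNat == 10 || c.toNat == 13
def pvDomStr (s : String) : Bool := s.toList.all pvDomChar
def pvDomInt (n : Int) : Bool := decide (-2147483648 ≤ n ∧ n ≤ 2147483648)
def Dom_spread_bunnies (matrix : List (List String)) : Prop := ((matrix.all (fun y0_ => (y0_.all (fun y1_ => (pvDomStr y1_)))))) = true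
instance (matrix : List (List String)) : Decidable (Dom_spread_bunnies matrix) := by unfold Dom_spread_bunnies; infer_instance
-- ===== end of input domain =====

-- B replaces A's scatter-from-each-bunny mutation loop by a single gather pass over a
-- snapshot (each cell becomes 'B' iff it is or orthogonally touches an original bunny);
-- both Pythons mutate `matrix` in place and return it, the proof is about the return value.

-- shared low-level grid helpers (matrix[i][j] read, matrix[i][j] = v write; in-range under Pre_)
def pvCell (m : List (List String)) (i j : Nat) : String := ((m[i]?.getD [])[j]?).getD ""

def pvCellI (m : List (List String)) (i j : Int) : String := pvCell m i.toNat j.toNat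

def pvInb (m : List (List String)) (t : Int × Int) : Bool :=
  decide (0 ≤ t.1) && decide (t.1 < (m.length : Int)) &&
  decide (0 ≤ t.2) && decide (t.2 < (((m.headD []).length : Int)))

def pvSetCell (m : List (List String)) (i j : Int) (v : String) : List (List String) :=
  m.set i.toNat ((m[i.toNat]?.getD []).set j.toNat v)

-- the four direction targets of a cell, in the source's dict order U, D, L, R
def pvTgts (b : Int × Int) : List (Int × Int) :=
  [(b.1 - 1, b.2), (b.1 + 1, b.2), (b.1, b.2 - 1), (b.1, b.2 + 1)]

-- ===== PORT A =====
def spread_bunnies (matrix : List (List String)) : Bool × List (List String) :=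
  let bunnies :=
    (List.range matrix.length).foldl (fun acc i =>
      (List.range (matrix.headD []).length).foldl (fun acc2 j =>
        if pvCell matrix i j == "B" then acc2 ++ [((i : Int), (j : Int))] else acc2) acc)
      ([] : List (Int × Int))
  bunnies.foldl (fun st b =>
    (pvTgts b).foldl (fun st2 t =>
      if pvInb st2.2 t then
        if pvCellI st2.2 t.1 t.2 == "P" then (true, pvSetCell st2.2 t.1 t.2 "B")
        else (st2.1, pvSetCell st2.2 t.1 t.2 "B")
      else st2) st) (false, matrix)

-- ===== PORT B =====
def spread_bunnies_alt (matrix : List (List String)) : Bool × List (List String) :=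
  match matrix with
  | [] => (false, matrix)
  | r0 :: _ =>
    let rows := matrix.length
    let cols := r0.length
    let bunny : Int → Int → Bool := fun i j =>
      pvInb matrix (i, j) && (pvCellI matrix i j == "B")
    let near : Int → Int → Bool := fun i j =>
      bunny (i - 1) j || bunny (i + 1) j || bunny i (j - 1) || bunny i (j + 1)
    let died := (List.range rows).any fun (i : Nat) => (List.range cols).any fun (j : Nat) =>
      (pvCell matrix i j == "P") && near (i : Int) (j : Int)
    let newM := matrix.mapIdx fun i row =>
      ((List.range cols).map fun (j : Nat) =>
        if bunny (i : Int) (j : Int) || near (i : Int) (j : Int) then "B"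
        else pvCell matrix i j) ++ row.drop cols
    (died, newM)

-- ===== PRECONDITION & SPEC =====
-- Pre_ excludes jagged matrices having a row shorter than row 0, on which A raises IndexError.
def Pre_spread_bunnies (matrix : List (List String)) : Prop :=
  ∀ row ∈ matrix, (matrix.headD []).length ≤ row.length

instance (matrix : List (List String)) : Decidable (Pre_spread_bunnies matrix) := by
  unfold Pre_spread_bunnies; infer_instance

def pvWitness_spread_bunnies : List (List String) := [["P", "."], [".", "B"]]

def Spec_spread_bunnies (matrix : List (List String)) (out : Bool × List (List String)) : Prop := out = spread_bunnies_alt matrix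
instance (matrix : List (List String)) (out : Bool × List (List String)) : Decidable (Spec_spread_bunnies matrix out) := by unfold Spec_spread_bunnies; infer_instance

-- ===== CLAIM (what is proved, stated in full; the proofs are below) =====
def Claim_equal_spread_bunnies : Prop := ∀ (matrix : List (List String)), Dom_spread_bunnies matrix → Pre_spread_bunnies matrix → Spec_spread_bunnies matrix (spread_bunnies matrix)

-- ===== LEMMAS AND PROOFS =====

-- `matrix` after writing 'B' at every cell where c holds
def pvApp (m : List (List String)) (c : Nat → Nat → Bool) : List (List String) :=
  m.mapIdx fun k row => row.mapIdx fun j v => if c k j then "B" else v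

-- the in-bounds written neighbourhood of the cells in L
def pvCov (m : List (List String)) (L : List (Int × Int)) (k j : Nat) : Bool :=
  L.any fun b => (pvTgts b).any fun t => pvInb m t && (t.1 == (k : Int) && t.2 == (j : Int))

-- "some in-bounds neighbour of b is originally 'P'"
def pvHit (m : List (List String)) (b : Int × Int) : Bool :=
  (pvTgts b).any fun t => pvInb m t && (pvCellI m t.1 t.2 == "P")

theorem pvApp_length (m : List (List String)) (c : Nat → Nat → Bool) :
    (pvApp m c).length = m.length := by
  simp [pvApp]

theorem pvApp_row (m : List (List String)) (c : Nat → Nat → Bool) (k : Nat) (hk : k < m.length) :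
    (pvApp m c)[k]? = some ((m[k]).mapIdx fun j v => if c k j then "B" else v) := by
  simp [pvApp, hk]

theorem pvApp_headD (m : List (List String)) (c : Nat → Nat → Bool) :
    ((pvApp m c).headD []).length = (m.headD []).length := by
  cases m with
  | nil => simp [pvApp]
  | cons r rs => simp [pvApp]

theorem pvApp_false (m : List (List String)) : pvApp m (fun _ _ => false) = m := by
  apply List.ext_getElem <;> simp [pvApp]
  intro i h1 h2
  apply List.ext_getElem <;> simp

theorem pvInb_app (m : List (List String)) (c : Nat → Nat → Bool) (t : Int × Int) :
    pvInb (pvApp m c) t = pvInb m t := by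
  have h := pvApp_headD m c
  simp only [List.headD_eq_head?_getD] at h
  simp [pvInb, pvApp_length, h]

theorem pvCell_app (m : List (List String)) (c : Nat → Nat → Bool) (k j : Nat)
    (hk : k < m.length) (hj : j < (m[k]).length) :
    pvCell (pvApp m c) k j = if c k j then "B" else pvCell m k j := by
  simp [pvCell, pvApp_row m c k hk, hj, hk]

theorem pvSet_app (m : List (List String)) (c : Nat → Nat → Bool) (k j : Nat)
    (hk : k < m.length) (_hj : j < (m[k]).length) :
    pvSetCell (pvApp m c) (k : Int) (j : Int) "B"
      = pvApp m (fun a b => c a b || (a == k && b == j)) := by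
  have hz : k < (pvApp m c).length := by simpa [pvApp_length] using hk
  unfold pvSetCell
  simp only [Int.toNat_natCast, List.getElem?_eq_getElem hz, Option.getD_some]
  apply List.ext_getElem
  · simp [pvApp]
  · intro a h1 h2
    have ha : a < m.length := by simpa [pvApp] using h2
    by_cases hak : k = a
    · subst hak
      rw [List.getElem_set_self]
      apply List.ext_getElem
      · simp [pvApp]
      · intro b hb1 hb2
        have hbl : b < (m[k]).length := by simpa [pvApp] using hb2
        rw [List.getElem_set]
        by_cases hbj : j = b
        · subst hbj
          simp [pvApp]
        · rw [if_neg hbj]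
          have hne : b ≠ j := Ne.symm hbj
          simp [pvApp, hne]
    · rw [List.getElem_set_ne hak]
      have hne : a ≠ k := Ne.symm hak
      simp [pvApp, hne]

-- one direction step of A's spreading loop, over a matrix of shape pvApp m c
theorem pv_step_cell (m : List (List String)) (c : Nat → Nat → Bool) (d : Bool)
    (hpre : Pre_spread_bunnies m)
    (hc : ∀ k j, k < m.length → j < (m[k]?.getD []).length → c k j = true →
          pvCell m k j = "P" → d = true)
    (t : Int × Int) :
    (if pvInb (pvApp m c) t then
        if pvCellI (pvApp m c) t.1 t.2 == "P" then (true, pvSetCell (pvApp m c) t.1 t.2 "B")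
        else (d, pvSetCell (pvApp m c) t.1 t.2 "B")
      else (d, pvApp m c))
    = (d || (pvInb m t && (pvCellI m t.1 t.2 == "P")),
       pvApp m (fun a b => c a b || (pvInb m t && ((t.1 == (a : Int)) && (t.2 == (b : Int)))))) := by
  by_cases hin : pvInb m t = true
  · obtain ⟨hn1, hl1, hn2, hl2⟩ : 0 ≤ t.1 ∧ t.1 < (m.length : Int) ∧ 0 ≤ t.2 ∧
        t.2 < (((m.headD []).length : Int)) := by
      have := hin
      simp [pvInb] at this
      exact ⟨this.1.1.1, this.1.1.2, this.1.2, by simpa [List.headD_eq_head?_getD] using this.2⟩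
    obtain ⟨k, j, ht1, ht2, hkm, hjc⟩ : ∃ k j : Nat, t.1 = (k : Int) ∧ t.2 = (j : Int) ∧
        k < m.length ∧ j < (m.headD []).length :=
      ⟨t.1.toNat, t.2.toNat, (Int.toNat_of_nonneg hn1).symm, (Int.toNat_of_nonneg hn2).symm,
        by omega, by omega⟩
    have hjm : j < (m[k]).length :=
      lt_of_lt_of_le hjc (hpre (m[k]) (List.getElem_mem hkm))
    have hfun : (fun a b => c a b || (true && ((t.1 == (a : Int)) && (t.2 == (b : Int)))))
        = (fun a b => c a b || (a == k && b == j)) := by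
      funext a b
      rw [ht1, ht2]
      congr 1
      rw [Bool.eq_iff_iff]
      simp only [Bool.true_and, Bool.and_eq_true, beq_iff_eq]
      omega
    have hcell : pvCellI (pvApp m c) t.1 t.2 = if c k j then "B" else pvCell m k j := by
      rw [ht1, ht2]
      simpa [pvCellI] using pvCell_app m c k j hkm hjm
    have hset : pvSetCell (pvApp m c) t.1 t.2 "B"
        = pvApp m (fun a b => c a b || (a == k && b == j)) := by
      rw [ht1, ht2]
      exact pvSet_app m c k j hkm hjm
    have hPI : pvCellI m t.1 t.2 = pvCell m k j := by
      simp [pvCellI, ht1, ht2]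
    rw [pvInb_app, hin, if_pos rfl, hcell, hset, hPI, hfun]
    by_cases hck : c k j = true
    · by_cases hP : pvCell m k j = "P"
      · have hd : d = true :=
          hc k j hkm (by simpa [List.getElem?_eq_getElem, hkm] using hjm) hck hP
        simp [hck, hd]
      · simp [hck, hP]
    · have hck' : c k j = false := by simpa using hck
      by_cases hP : pvCell m k j = "P" <;> simp [hck', hP]
  · have hfalse : pvInb m t = false := by simpa using hin
    rw [pvInb_app, hfalse]
    simp

-- A's inner direction loop over any target list, over a matrix of shape pvApp m c
theorem pv_fold_tgts (m : List (List String)) (hpre : Pre_spread_bunnies m) :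
    ∀ (T : List (Int × Int)) (c : Nat → Nat → Bool) (d : Bool),
    (∀ k j, k < m.length → j < (m[k]?.getD []).length → c k j = true →
        pvCell m k j = "P" → d = true) →
    T.foldl (fun st2 t =>
        if pvInb st2.2 t then
          if pvCellI st2.2 t.1 t.2 == "P" then (true, pvSetCell st2.2 t.1 t.2 "B")
          else (st2.1, pvSetCell st2.2 t.1 t.2 "B")
        else st2) (d, pvApp m c)
    = (d || T.any (fun t => pvInb m t && (pvCellI m t.1 t.2 == "P")),
       pvApp m (fun a b => c a b ||
         T.any (fun t => pvInb m t && ((t.1 == (a : Int)) && (t.2 == (b : Int)))))) := by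
  intro T
  induction T with
  | nil => intro c d hc; simp
  | cons t T ih =>
    intro c d hc
    rw [List.foldl_cons, pv_step_cell m c d hpre hc t]
    rw [ih (fun a b => c a b || (pvInb m t && ((t.1 == (a : Int)) && (t.2 == (b : Int)))))
        (d || (pvInb m t && (pvCellI m t.1 t.2 == "P"))) ?_]
    · simp only [Prod.mk.injEq]
      refine ⟨?_, ?_⟩
      · simp [Bool.or_assoc]
      · congr 1
        funext a b
        simp [Bool.or_assoc]
    · intro k j hk hj hcor hP
      rcases Bool.or_eq_true_iff.mp hcor with h | h
      · simp [hc k j hk hj h hP]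
      · rcases Bool.and_eq_true_iff.mp h with ⟨ht, heq⟩
        rcases Bool.and_eq_true_iff.mp heq with ⟨h1, h2⟩
        have e1 : t.1 = (k : Int) := by simpa using h1
        have e2 : t.2 = (j : Int) := by simpa using h2
        have : pvCellI m t.1 t.2 = "P" := by simpa [pvCellI, e1, e2] using hP
        simp [ht, this]

-- A's whole spreading fold, characterised
theorem pv_fold_bunnies (m : List (List String)) (hpre : Pre_spread_bunnies m)
    (L : List (Int × Int)) :
    ∀ (c : Nat → Nat → Bool) (d : Bool),
    (∀ k j, k < m.length → j < (m[k]?.getD []).length → c k j = true →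
        pvCell m k j = "P" → d = true) →
    L.foldl (fun st b =>
      (pvTgts b).foldl (fun st2 t =>
        if pvInb st2.2 t then
          if pvCellI st2.2 t.1 t.2 == "P" then (true, pvSetCell st2.2 t.1 t.2 "B")
          else (st2.1, pvSetCell st2.2 t.1 t.2 "B")
        else st2) st) (d, pvApp m c)
    = (d || L.any (pvHit m), pvApp m (fun a b => c a b || pvCov m L a b)) := by
  induction L with
  | nil =>
    intro c d hc
    simp [pvCov]
  | cons b L ih =>
    intro c d hc
    rw [List.foldl_cons, pv_fold_tgts m hpre (pvTgts b) c d hc]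
    rw [ih (fun a b' => c a b' ||
          (pvTgts b).any (fun t => pvInb m t && ((t.1 == (a : Int)) && (t.2 == (b' : Int)))))
        (d || (pvTgts b).any (fun t => pvInb m t && (pvCellI m t.1 t.2 == "P"))) ?_]
    · simp only [Prod.mk.injEq]
      refine ⟨?_, ?_⟩
      · simp [pvHit, Bool.or_assoc]
      · congr 1
        funext a b'
        simp [pvCov, Bool.or_assoc]
    · intro k j hk hj hcor hP
      rcases Bool.or_eq_true_iff.mp hcor with h | h
      · simp [hc k j hk hj h hP]
      · rcases List.any_eq_true.mp h with ⟨t, htm, hh⟩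
        rcases Bool.and_eq_true_iff.mp hh with ⟨ht, heq⟩
        rcases Bool.and_eq_true_iff.mp heq with ⟨h1, h2⟩
        have e1 : t.1 = (k : Int) := by simpa using h1
        have e2 : t.2 = (j : Int) := by simpa using h2
        have hcell : pvCellI m t.1 t.2 = "P" := by simpa [pvCellI, e1, e2] using hP
        have : (pvTgts b).any (fun t => pvInb m t && (pvCellI m t.1 t.2 == "P")) = true :=
          List.any_eq_true.mpr ⟨t, htm, by simp [ht, hcell]⟩
        simp [this]

-- the bunny list A's first pass builds, in closed form
def pvBun (m : List (List String)) : List (Int × Int) :=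
  (List.range m.length).flatMap fun i =>
    ((List.range (m.headD []).length).filter fun j => pvCell m i j == "B").map
      fun (j : Nat) => ((i : Int), (j : Int))

-- "(a,b') has an orthogonal neighbour that is an original in-bounds bunny"
def pvNB (m : List (List String)) (a b' : Nat) : Prop :=
  ∃ i j : Nat, i < m.length ∧ j < (m.headD []).length ∧ pvCell m i j = "B" ∧
    ((i + 1 = a ∧ j = b') ∨ (a + 1 = i ∧ j = b') ∨ (i = a ∧ j + 1 = b') ∨ (i = a ∧ b' + 1 = j))

theorem pvBun_eq (m : List (List String)) :
    (List.range m.length).foldl (fun acc i =>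
      (List.range (m.headD []).length).foldl (fun acc2 j =>
        if pvCell m i j == "B" then acc2 ++ [((i : Int), (j : Int))] else acc2) acc)
      ([] : List (Int × Int)) = pvBun m := by
  simp only [PySem.List.foldl_append_if]
  rw [PySem.List.foldl_append_eq_flatMap, List.nil_append]
  rfl

theorem pvBun_mem (m : List (List String)) (p : Int × Int) :
    p ∈ pvBun m ↔ ∃ i j : Nat, i < m.length ∧ j < (m.headD []).length ∧
      pvCell m i j = "B" ∧ p = ((i : Int), (j : Int)) := by
  simp [pvBun, List.mem_flatMap, List.mem_map, List.mem_filter, List.mem_range]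
  constructor
  · rintro ⟨i, hi, j, ⟨hj, hB⟩, he⟩
    exact ⟨i, hi, j, hj, hB, he.symm⟩
  · rintro ⟨i, hi, j, hj, hB, he⟩
    exact ⟨i, hi, j, ⟨hj, hB⟩, he.symm⟩

theorem pvInb_iff (m : List (List String)) (t : Int × Int) :
    pvInb m t = true ↔ (0 ≤ t.1 ∧ t.1 < (m.length : Int) ∧ 0 ≤ t.2 ∧
      t.2 < ((m.headD []).length : Int)) := by
  unfold pvInb
  simp only [Bool.and_eq_true, decide_eq_true_eq]
  tauto

theorem pv_cov_iff (m : List (List String)) (a b' : Nat) :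
    pvCov m (pvBun m) a b' = true ↔
      a < m.length ∧ b' < (m.headD []).length ∧ pvNB m a b' := by
  unfold pvCov
  rw [List.any_eq_true]
  constructor
  · rintro ⟨b, hbmem, hb⟩
    rcases (pvBun_mem m b).mp hbmem with ⟨i, j, hi, hj, hB, rfl⟩
    simp only [pvTgts, List.any_cons, List.any_nil, Bool.or_false, Bool.or_eq_true,
      Bool.and_eq_true, beq_iff_eq, pvInb_iff] at hb
    rcases hb with ⟨hin, he1, he2⟩ | ⟨hin, he1, he2⟩ | ⟨hin, he1, he2⟩ | ⟨hin, he1, he2⟩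
    · exact ⟨by omega, by omega, i, j, hi, hj, hB, Or.inr (Or.inl ⟨by omega, by omega⟩)⟩
    · exact ⟨by omega, by omega, i, j, hi, hj, hB, Or.inl ⟨by omega, by omega⟩⟩
    · exact ⟨by omega, by omega, i, j, hi, hj, hB, Or.inr (Or.inr (Or.inr ⟨by omega, by omega⟩))⟩
    · exact ⟨by omega, by omega, i, j, hi, hj, hB, Or.inr (Or.inr (Or.inl ⟨by omega, by omega⟩))⟩
  · rintro ⟨ha, hb', i, j, hi, hj, hB, hd⟩
    refine ⟨((i : Int), (j : Int)), (pvBun_mem m ((i:Int),(j:Int))).mpr ⟨i, j, hi, hj, hB, rfl⟩, ?_⟩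
    simp only [pvTgts, List.any_cons, List.any_nil, Bool.or_false, Bool.or_eq_true,
      Bool.and_eq_true, beq_iff_eq, pvInb_iff]
    rcases hd with ⟨e1, e2⟩ | ⟨e1, e2⟩ | ⟨e1, e2⟩ | ⟨e1, e2⟩
    · exact Or.inr (Or.inl ⟨⟨by omega, by omega, by omega, by omega⟩, by omega, by omega⟩)
    · exact Or.inl ⟨⟨by omega, by omega, by omega, by omega⟩, by omega, by omega⟩
    · exact Or.inr (Or.inr (Or.inr ⟨⟨by omega, by omega, by omega, by omega⟩, by omega, by omega⟩))
    · exact Or.inr (Or.inr (Or.inl ⟨⟨by omega, by omega, by omega, by omega⟩, by omega, by omega⟩))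

theorem pv_hit_iff (m : List (List String)) :
    (pvBun m).any (pvHit m) = true ↔
      ∃ a b' : Nat, a < m.length ∧ b' < (m.headD []).length ∧
        pvCell m a b' = "P" ∧ pvNB m a b' := by
  rw [List.any_eq_true]
  constructor
  · rintro ⟨b, hbmem, hb⟩
    rcases (pvBun_mem m b).mp hbmem with ⟨i, j, hi, hj, hB, rfl⟩
    unfold pvHit at hb
    simp only [pvTgts, List.any_cons, List.any_nil, Bool.or_false, Bool.or_eq_true,
      Bool.and_eq_true, beq_iff_eq, pvInb_iff] at hb
    rcases hb with ⟨hin, hP⟩ | ⟨hin, hP⟩ | ⟨hin, hP⟩ | ⟨hin, hP⟩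
    · refine ⟨i - 1, j, by omega, by omega, ?_, i, j, hi, hj, hB, Or.inr (Or.inl ⟨by omega, rfl⟩)⟩
      have : ((i : Int) - 1) = ((i - 1 : Nat) : Int) := by omega
      simpa [pvCellI, this] using hP
    · refine ⟨i + 1, j, by omega, by omega, ?_, i, j, hi, hj, hB, Or.inl ⟨rfl, rfl⟩⟩
      have h1 : pvCellI m ((i : Int) + 1) ((j : Int)) = pvCell m (i + 1) j := by
        simp only [pvCellI]
        rw [show ((i : Int) + 1).toNat = i + 1 from by omega, Int.toNat_natCast]
      rw [← h1]; exact hP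
    · refine ⟨i, j - 1, by omega, by omega, ?_, i, j, hi, hj, hB,
        Or.inr (Or.inr (Or.inr ⟨rfl, by omega⟩))⟩
      have : ((j : Int) - 1) = ((j - 1 : Nat) : Int) := by omega
      simpa [pvCellI, this] using hP
    · refine ⟨i, j + 1, by omega, by omega, ?_, i, j, hi, hj, hB,
        Or.inr (Or.inr (Or.inl ⟨rfl, rfl⟩))⟩
      have h1 : pvCellI m ((i : Int)) ((j : Int) + 1) = pvCell m i (j + 1) := by
        simp only [pvCellI]
        rw [show ((j : Int) + 1).toNat = j + 1 from by omega, Int.toNat_natCast]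
      rw [← h1]; exact hP
  · rintro ⟨a, b', ha, hb', hP, i, j, hi, hj, hB, hd⟩
    refine ⟨((i : Int), (j : Int)), (pvBun_mem m ((i:Int),(j:Int))).mpr ⟨i, j, hi, hj, hB, rfl⟩, ?_⟩
    unfold pvHit
    simp only [pvTgts, List.any_cons, List.any_nil, Bool.or_false, Bool.or_eq_true,
      Bool.and_eq_true, beq_iff_eq, pvInb_iff]
    rcases hd with ⟨e1, e2⟩ | ⟨e1, e2⟩ | ⟨e1, e2⟩ | ⟨e1, e2⟩
    · refine Or.inr (Or.inl ⟨⟨by omega, by omega, by omega, by omega⟩, ?_⟩)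
      have h1 : pvCellI m ((i : Int) + 1) ((j : Int)) = pvCell m a b' := by
        have e3 : ((i : Int) + 1) = ((a : Nat) : Int) := by omega
        have e4 : ((j : Int)) = ((b' : Nat) : Int) := by omega
        simp [pvCellI, e3, e4]
      rw [h1]; exact hP
    · refine Or.inl ⟨⟨by omega, by omega, by omega, by omega⟩, ?_⟩
      have h1 : pvCellI m ((i : Int) - 1) ((j : Int)) = pvCell m a b' := by
        have e3 : ((i : Int) - 1) = ((a : Nat) : Int) := by omega
        have e4 : ((j : Int)) = ((b' : Nat) : Int) := by omega
        simp [pvCellI, e3, e4]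
      rw [h1]; exact hP
    · refine Or.inr (Or.inr (Or.inr ⟨⟨by omega, by omega, by omega, by omega⟩, ?_⟩))
      have h1 : pvCellI m ((i : Int)) ((j : Int) + 1) = pvCell m a b' := by
        have e3 : ((i : Int)) = ((a : Nat) : Int) := by omega
        have e4 : ((j : Int) + 1) = ((b' : Nat) : Int) := by omega
        simp [pvCellI, e3, e4]
      rw [h1]; exact hP
    · refine Or.inr (Or.inr (Or.inl ⟨⟨by omega, by omega, by omega, by omega⟩, ?_⟩))
      have h1 : pvCellI m ((i : Int)) ((j : Int) - 1) = pvCell m a b' := by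
        have e3 : ((i : Int)) = ((a : Nat) : Int) := by omega
        have e4 : ((j : Int) - 1) = ((b' : Nat) : Int) := by omega
        simp [pvCellI, e3, e4]
      rw [h1]; exact hP

theorem pv_bunny_iff (m : List (List String)) (x y : Int) :
    (pvInb m (x, y) && (pvCellI m x y == "B")) = true ↔
      ∃ i j : Nat, x = (i : Int) ∧ y = (j : Int) ∧ i < m.length ∧
        j < (m.headD []).length ∧ pvCell m i j = "B" := by
  rw [Bool.and_eq_true]
  constructor
  · rintro ⟨hin, hB⟩
    rcases (pvInb_iff m (x, y)).mp hin with ⟨h1, h2, h3, h4⟩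
    simp only at h1 h2 h3 h4
    refine ⟨x.toNat, y.toNat, (Int.toNat_of_nonneg h1).symm, (Int.toNat_of_nonneg h3).symm,
      by omega, by omega, ?_⟩
    simpa [pvCellI] using (beq_iff_eq.mp hB)
  · rintro ⟨i, j, rfl, rfl, hi, hj, hB⟩
    refine ⟨(pvInb_iff m (_, _)).mpr ⟨by omega, by omega, by omega, by omega⟩, ?_⟩
    simp [pvCellI, hB]

theorem pv_near_iff (m : List (List String)) (a b' : Nat) :
    ((pvInb m (((a : Int)) - 1, (b' : Int)) && (pvCellI m ((a : Int) - 1) (b' : Int) == "B")) ||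
     (pvInb m ((a : Int) + 1, (b' : Int)) && (pvCellI m ((a : Int) + 1) (b' : Int) == "B")) ||
     (pvInb m ((a : Int), (b' : Int) - 1) && (pvCellI m (a : Int) ((b' : Int) - 1) == "B")) ||
     (pvInb m ((a : Int), (b' : Int) + 1) && (pvCellI m (a : Int) ((b' : Int) + 1) == "B"))) = true
      ↔ pvNB m a b' := by
  simp only [Bool.or_eq_true, pv_bunny_iff]
  constructor
  · rintro (((⟨i, j, e1, e2, hi, hj, hB⟩ | ⟨i, j, e1, e2, hi, hj, hB⟩) |
      ⟨i, j, e1, e2, hi, hj, hB⟩) | ⟨i, j, e1, e2, hi, hj, hB⟩)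
    · exact ⟨i, j, hi, hj, hB, Or.inl ⟨by omega, by omega⟩⟩
    · exact ⟨i, j, hi, hj, hB, Or.inr (Or.inl ⟨by omega, by omega⟩)⟩
    · exact ⟨i, j, hi, hj, hB, Or.inr (Or.inr (Or.inl ⟨by omega, by omega⟩))⟩
    · exact ⟨i, j, hi, hj, hB, Or.inr (Or.inr (Or.inr ⟨by omega, by omega⟩))⟩
  · rintro ⟨i, j, hi, hj, hB, (⟨e1, e2⟩ | ⟨e1, e2⟩ | ⟨e1, e2⟩ | ⟨e1, e2⟩)⟩
    · exact Or.inl (Or.inl (Or.inl ⟨i, j, by omega, by omega, hi, hj, hB⟩))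
    · exact Or.inl (Or.inl (Or.inr ⟨i, j, by omega, by omega, hi, hj, hB⟩))
    · exact Or.inl (Or.inr ⟨i, j, by omega, by omega, hi, hj, hB⟩)
    · exact Or.inr ⟨i, j, by omega, by omega, hi, hj, hB⟩

theorem pv_main (m : List (List String)) (r0 : List String) (rest : List (List String))
    (hm : m = r0 :: rest) (hpre : Pre_spread_bunnies m) :
    spread_bunnies m = spread_bunnies_alt m := by
  subst hm
  have hA : spread_bunnies (r0 :: rest)
      = ((pvBun (r0 :: rest)).any (pvHit (r0 :: rest)),
         pvApp (r0 :: rest) (pvCov (r0 :: rest) (pvBun (r0 :: rest)))) := by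
    simp only [spread_bunnies]
    rw [pvBun_eq]
    have h0 : ((false : Bool), r0 :: rest)
        = ((false : Bool), pvApp (r0 :: rest) (fun _ _ => false)) := by rw [pvApp_false]
    rw [h0, pv_fold_bunnies (r0 :: rest) hpre (pvBun (r0 :: rest)) (fun _ _ => false) false
      (by intro k j _ _ h; cases h)]
    simp
  rw [hA]
  simp only [spread_bunnies_alt, Prod.mk.injEq]
  refine ⟨?_, ?_⟩
  · rw [Bool.eq_iff_iff, pv_hit_iff, List.any_eq_true]
    constructor
    · rintro ⟨a, b', ha, hb', hP, hnb⟩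
      refine ⟨a, List.mem_range.mpr ha, ?_⟩
      rw [List.any_eq_true]
      refine ⟨b', List.mem_range.mpr hb', ?_⟩
      rw [Bool.and_eq_true]
      exact ⟨beq_iff_eq.mpr hP, (pv_near_iff (r0 :: rest) a b').mpr hnb⟩
    · rintro ⟨a, hmem, h2⟩
      rw [List.any_eq_true] at h2
      rcases h2 with ⟨b', hmem2, h3⟩
      rcases Bool.and_eq_true_iff.mp h3 with ⟨hP, hnear⟩
      exact ⟨a, b', List.mem_range.mp hmem, List.mem_range.mp hmem2, beq_iff_eq.mp hP,
        (pv_near_iff (r0 :: rest) a b').mp hnear⟩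
  · apply List.ext_getElem
    · simp [pvApp]
    · intro a h1 h2
      have ha : a < (r0 :: rest).length := by simpa [pvApp] using h1
      have hrow : r0.length ≤ ((r0 :: rest)[a]).length :=
        hpre ((r0 :: rest)[a]) (List.getElem_mem ha)
      simp only [pvApp]
      rw [List.getElem_mapIdx, List.getElem_mapIdx]
      apply List.ext_getElem
      · simp
        omega
      · intro b hb1 hb2
        have hbl : b < ((r0 :: rest)[a]).length := by simpa using hb1
        rw [List.getElem_mapIdx]
        have hcell : pvCell (r0 :: rest) a b = ((r0 :: rest)[a])[b] := by
          simp only [pvCell]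
          rw [List.getElem?_eq_getElem ha, Option.getD_some,
            List.getElem?_eq_getElem hbl, Option.getD_some]
        by_cases hbc : b < r0.length
        · rw [List.getElem_append_left (by simpa using hbc)]
          rw [List.getElem_map, List.getElem_range]
          by_cases hcov : pvCov (r0 :: rest) (pvBun (r0 :: rest)) a b = true
          · have hnb := ((pv_cov_iff (r0 :: rest) a b).mp hcov).2.2
            have hnearB := (pv_near_iff (r0 :: rest) a b).mpr hnb
            simp [hcov, hnearB]
          · have hcov' : pvCov (r0 :: rest) (pvBun (r0 :: rest)) a b = false := by
              simpa using hcov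
            have hnear : ((pvInb (r0 :: rest) (((a : Int)) - 1, (b : Int)) &&
                (pvCellI (r0 :: rest) ((a : Int) - 1) (b : Int) == "B")) ||
              (pvInb (r0 :: rest) ((a : Int) + 1, (b : Int)) &&
                (pvCellI (r0 :: rest) ((a : Int) + 1) (b : Int) == "B")) ||
              (pvInb (r0 :: rest) ((a : Int), (b : Int) - 1) &&
                (pvCellI (r0 :: rest) (a : Int) ((b : Int) - 1) == "B")) ||
              (pvInb (r0 :: rest) ((a : Int), (b : Int) + 1) &&
                (pvCellI (r0 :: rest) (a : Int) ((b : Int) + 1) == "B"))) = false := by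
              rw [Bool.eq_false_iff]
              intro hcon
              have hnb := (pv_near_iff (r0 :: rest) a b).mp hcon
              exact (Bool.eq_false_iff.mp hcov')
                ((pv_cov_iff (r0 :: rest) a b).mpr ⟨ha, hbc, hnb⟩)
            by_cases hbun : (pvInb (r0 :: rest) ((a : Int), (b : Int)) &&
                (pvCellI (r0 :: rest) (a : Int) (b : Int) == "B")) = true
            · rcases (pv_bunny_iff (r0 :: rest) (a : Int) (b : Int)).mp hbun with
                ⟨i, j, e1, e2, hi, hj, hB⟩
              have e1' : i = a := by omega
              have e2' : j = b := by omega
              subst e1'; subst e2'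
              have hBcell : ((r0 :: rest)[i])[j] = "B" := by rw [← hcell]; exact hB
              simp [hcov', hnear, hbun, hBcell]
            · have hbun' : (pvInb (r0 :: rest) ((a : Int), (b : Int)) &&
                  (pvCellI (r0 :: rest) (a : Int) (b : Int) == "B")) = false := by simpa using hbun
              simp [hcov', hnear, hbun', hcell]
        · rw [List.getElem_append_right (by simpa using hbc)]
          have hcov' : pvCov (r0 :: rest) (pvBun (r0 :: rest)) a b = false := by
            rw [Bool.eq_false_iff]
            intro hcon
            rcases (pv_cov_iff (r0 :: rest) a b).mp hcon with ⟨_, hb2', _⟩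
            exact hbc hb2'
          rw [if_neg (by simp [hcov'])]
          simp only [List.length_map, List.length_range]
          rw [List.getElem_drop]
          congr 1
          omega

-- ===== VERDICT (by name: the statement is the Claim_ definition above) =====
theorem spread_bunnies_spec : Claim_equal_spread_bunnies := by
  intro matrix _dom hpre
  unfold Spec_spread_bunnies
  cases matrix with
  | nil => rfl
  | cons r0 rest => exact pv_main (r0 :: rest) r0 rest rfl hpre
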